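-- pv_equiv track=rewrite | github.com/quethaibinh/code_ptit_python | PY01049.py | check
-- ===== SOURCE A (Python) =====
-- def check(s):
--     if len(s) == 0 or len(s) == 1: return False
--     cnt = 0
--     for i in range(len(s)):
--         if s[i] == '2' or s[i] == '3' or s[i] == '5' or s[i] == '7': cnt += 1
--     if cnt <= (len(s) // 2) : return False
--     for i in range(2, len(s)):
--         if len(s) % i == 0: return False
--     return True
-- ===== SOURCE B (Python) =====
-- def check(s):
--     n = len(s)
--     if n < 2:
--         return False
--     if sum(1 for c in s if c in '2357') <= n // 2:
--         return False
--     i = 2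
--     while i * i <= n:
--         if n % i == 0:
--             return False
--         i += 1
--     return True
-- ===== Notes on version B (the rewrite author's own statement) =====
-- stated objective: faster
-- what changed: Counts prime digits with a generator-sum membership test instead of an indexed loop, and tests the length's primality by sqrt-bounded trial division (i*i <= n) instead of trying every divisor up to n-1.
import Mathlib
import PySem

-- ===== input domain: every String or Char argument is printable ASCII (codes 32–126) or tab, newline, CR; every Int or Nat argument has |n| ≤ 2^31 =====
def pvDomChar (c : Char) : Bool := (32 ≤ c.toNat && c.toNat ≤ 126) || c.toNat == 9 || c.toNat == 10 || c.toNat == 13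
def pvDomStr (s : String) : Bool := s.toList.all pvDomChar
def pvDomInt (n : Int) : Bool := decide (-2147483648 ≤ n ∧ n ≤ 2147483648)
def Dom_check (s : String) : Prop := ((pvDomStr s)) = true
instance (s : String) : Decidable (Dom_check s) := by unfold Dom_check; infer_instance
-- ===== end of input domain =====

-- B replaces the indexed prime-digit count by a membership count over the characters and the
-- full trial division up to n-1 by a sqrt-bounded (i*i ≤ n) trial-division loop; same results.

-- ===== PORT A =====
-- for i in range(len(s)): indices are 0..n-1, always in range, so s[i] is l.getD i ' '
-- (the default ' ' is never used); the early-return divisor loop is `.all` over range(2, n).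
def check (s : String) : Bool :=
  let l := s.toList
  let n := l.length
  if n = 0 || n = 1 then false
  else
    let cnt := (List.range n).foldl (fun cnt i =>
      if l.getD i ' ' == '2' || l.getD i ' ' == '3' || l.getD i ' ' == '5' || l.getD i ' ' == '7'
      then cnt + 1 else cnt) 0
    if cnt ≤ n / 2 then false
    else (List.range' 2 (n - 2)).all (fun i => !(n % i == 0))

-- ===== PORT B =====
-- while i * i <= n: if n % i == 0: return False; i += 1
def sqrtLoop (n i : Nat) : Bool :=
  if i * i ≤ n then
    if n % i = 0 then false else sqrtLoop n (i + 1)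
  else true
termination_by n + 2 - i
decreasing_by
  rename_i h
  rcases Nat.lt_or_ge i 2 with h2 | h2
  · omega
  · have : i ≤ i * i := Nat.le_mul_of_pos_left i (by omega)
    omega

def check_alt (s : String) : Bool :=
  let n := s.toList.length
  if n < 2 then false
  else if s.toList.countP (fun c => ("2357".toList).contains c) ≤ n / 2 then false
  else sqrtLoop n 2

-- ===== PRECONDITION & SPEC =====
def Spec_check (s : String) (out : Bool) : Prop := out = check_alt s
instance (s : String) (out : Bool) : Decidable (Spec_check s out) := by unfold Spec_check; infer_instance

-- ===== CLAIM (what is proved, stated in full; the proofs are below) =====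
def Claim_equal_check : Prop := ∀ (s : String), Dom_check s → Spec_check s (check s)

-- ===== LEMMAS AND PROOFS =====

-- the two digit tests agree on every character
lemma digit_test_eq (c : Char) :
    (c == '2' || c == '3' || c == '5' || c == '7') = (("2357".toList).contains c) := by
  have h : ("2357".toList) = ['2','3','5','7'] := rfl
  rw [h]
  simp only [List.contains, List.elem_eq_mem, List.mem_cons, List.not_mem_nil, or_false,
    Bool.beq_eq_decide_eq, Bool.decide_or, Bool.or_assoc]

-- A's indexed count over range n equals countP on the first n elements
lemma foldl_range_count (p : Char → Bool) (l : List Char) :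
    ∀ (n : Nat), n ≤ l.length → ∀ (acc : Nat),
      (List.range n).foldl (fun cnt i => if p (l.getD i ' ') then cnt + 1 else cnt) acc
        = acc + (l.take n).countP p := by
  intro n
  induction n with
  | zero => simp
  | succ m ih =>
    intro hn acc
    have hm : m < l.length := by omega
    rw [List.range_succ, List.foldl_append, ih (by omega)]
    have htake : l.take (m + 1) = l.take m ++ [l[m]] := by
      rw [List.take_add_one]
      simp [List.getElem?_eq_getElem hm]
    have hgetD : l.getD m ' ' = l[m] := by
      simp [List.getD, List.getElem?_eq_getElem hm]
    rw [htake, List.countP_append]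
    simp only [List.foldl_cons, List.foldl_nil, hgetD, List.countP_cons]
    split <;> simp_all <;> omega

-- A's full trial division decides primality of n (n ≥ 2)
lemma range'_all_prime (n : Nat) (hn : 2 ≤ n) :
    ((List.range' 2 (n - 2)).all (fun i => !(n % i == 0))) = decide (Nat.Prime n) := by
  by_cases hp : Nat.Prime n
  · simp only [hp, decide_true]
    rw [List.all_eq_true]
    intro i hi
    have hi' := List.mem_range'_1.mp hi
    simp only [Bool.not_eq_eq_eq_not, Bool.not_true, beq_eq_false_iff_ne, ne_eq]
    intro hmod
    have hdvd : i ∣ n := Nat.dvd_iff_mod_eq_zero.mpr hmod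
    exact (Nat.prime_def_lt'.mp hp).2 i (by omega) (by omega) hdvd
  · simp only [hp, decide_false]
    rw [List.all_eq_false]
    rw [Nat.prime_def_lt'] at hp
    push_neg at hp
    obtain ⟨m, hm2, hmn, hdvd⟩ := hp hn
    refine ⟨m, List.mem_range'_1.mpr ⟨hm2, by omega⟩, ?_⟩
    have hmod : n % m = 0 := Nat.dvd_iff_mod_eq_zero.mp hdvd
    simp [hmod]

-- B's sqrt-bounded loop returns true iff no divisor m with i ≤ m and m * m ≤ n
lemma sqrtLoop_eq (n : Nat) : ∀ (i : Nat),
    (sqrtLoop n i = true ↔ ∀ m, i ≤ m → m * m ≤ n → n % m ≠ 0) := by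
  intro i
  induction i using sqrtLoop.induct n with
  | case1 i h hmod =>
    rw [sqrtLoop]
    simp only [h, if_true, hmod, if_true]
    constructor
    · intro hc; exact absurd hc (by simp)
    · intro hall; exact absurd hmod (hall i (le_refl i) h)
  | case2 i h hmod ih =>
    rw [sqrtLoop]
    simp only [h, if_true, if_neg hmod, ih]
    constructor
    · intro hall m him hm
      rcases Nat.eq_or_lt_of_le him with rfl | hlt
      · exact hmod
      · exact hall m (by omega) hm
    · intro hall m him hm
      exact hall m (by omega) hm
  | case3 i h =>
    rw [sqrtLoop]
    simp only [if_neg h]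
    constructor
    · intro _ m him hm _
      have : i * i ≤ m * m := Nat.mul_le_mul him him
      omega
    · intro _; trivial

lemma sqrtLoop_prime (n : Nat) (hn : 2 ≤ n) :
    sqrtLoop n 2 = decide (Nat.Prime n) := by
  have key : sqrtLoop n 2 = true ↔ Nat.Prime n := by
    rw [sqrtLoop_eq, Nat.prime_def_le_sqrt]
    constructor
    · intro hall
      refine ⟨hn, fun m hm2 hms hdvd => ?_⟩
      have hsq : Nat.sqrt n * Nat.sqrt n ≤ n := by
        have h1 := Nat.sqrt_le' n
        rwa [pow_two] at h1
      have hm : m * m ≤ n := le_trans (Nat.mul_le_mul hms hms) hsq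
      exact hall m hm2 hm (Nat.dvd_iff_mod_eq_zero.mp hdvd)
    · rintro ⟨-, hall⟩ m hm2 hmm hmod
      have hms : m ≤ Nat.sqrt n := Nat.le_sqrt'.mpr (by rwa [pow_two])
      exact hall m hm2 hms (Nat.dvd_iff_mod_eq_zero.mpr hmod)
  by_cases hp : Nat.Prime n
  · simp only [hp, decide_true]
    exact key.mpr hp
  · simp only [hp, decide_false]
    cases hb : sqrtLoop n 2
    · rfl
    · exact absurd (key.mp hb) hp

-- ===== VERDICT (by name: the statement is the Claim_ definition above) =====
theorem check_spec : Claim_equal_check := by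
  intro s _
  show check s = check_alt s
  unfold check check_alt
  generalize s.toList = l
  by_cases h2 : l.length < 2
  · have h0 : (decide (l.length = 0) || decide (l.length = 1)) = true := by
      simp only [Bool.or_eq_true, decide_eq_true_eq]; omega
    rw [if_pos h0, if_pos h2]
  · have hn2 : 2 ≤ l.length := by omega
    have h0 : (decide (l.length = 0) || decide (l.length = 1)) = false := by
      simp only [Bool.or_eq_false_iff, decide_eq_false_iff_not]; omega
    rw [if_neg (by simp only [h0]; exact Bool.false_ne_true), if_neg h2]
    have hfun : (fun (cnt i : Nat) =>
        if l.getD i ' ' == '2' || l.getD i ' ' == '3' || l.getD i ' ' == '5' || l.getD i ' ' == '7'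
        then cnt + 1 else cnt)
        = (fun (cnt i : Nat) =>
            if ("2357".toList).contains (l.getD i ' ') then cnt + 1 else cnt) := by
      funext cnt i
      rw [digit_test_eq]
    rw [hfun, foldl_range_count _ l l.length (le_refl _) 0, Nat.zero_add, List.take_length]
    by_cases hc : l.countP (fun c => ("2357".toList).contains c) ≤ l.length / 2
    · rw [if_pos hc, if_pos hc]
    · rw [if_neg hc, if_neg hc, range'_all_prime _ hn2, sqrtLoop_prime _ hn2]
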